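-- pv_equiv track=rewrite | github.com/MichelleZ/leetcode | algorithms/python/shortEncodingofWords/shortEncodingofWords.py | minimumLengthEncoding
-- ===== SOURCE A (Python) =====
-- from typing import List
--
-- def minimumLengthEncoding(words: List[str]) -> int:
--     words = sorted([word[::-1] for word in set(words)])
--     last = ''
--     res = 0
--     for word in words + ['']:
--         if not word.startswith(last):
--             res += len(last) + 1
--         last = word
--     return res
-- ===== SOURCE B (Python) =====
-- from typing import List
--
-- def minimumLengthEncoding(words: List[str]) -> int:
--     # A word contributes len(word)+1 to the encoding unless it is a proper
--     # suffix of another word: build the set of all proper suffixes once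
--     # (no sorting, no string reversal) and keep the words not in it.
--     ws = set(words)
--     suffixes = {w[k:] for w in ws for k in range(1, len(w) + 1)}
--     return sum(len(w) + 1 for w in ws if w not in suffixes)
-- ===== Notes on version B (the rewrite author's own statement) =====
-- stated objective: alternative
-- what changed: A reverses every word, sorts the reversals, and counts adjacent non-prefix steps in one scan; B drops the reversal and the sort entirely: it builds the set of all proper suffixes of the distinct words once and sums len+1 over the words not in that set.
-- intended difference: On nonempty lists whose words are all the empty string, A returns 0 (its sentinel '' at the end of the sorted scan silently absorbs the empty word) while B returns 1, the length of the encoding '#' of the empty word, which is the intended value. — e.g. on minimumLengthEncoding([""]): A returns 0, B returns 1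
import Mathlib
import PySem

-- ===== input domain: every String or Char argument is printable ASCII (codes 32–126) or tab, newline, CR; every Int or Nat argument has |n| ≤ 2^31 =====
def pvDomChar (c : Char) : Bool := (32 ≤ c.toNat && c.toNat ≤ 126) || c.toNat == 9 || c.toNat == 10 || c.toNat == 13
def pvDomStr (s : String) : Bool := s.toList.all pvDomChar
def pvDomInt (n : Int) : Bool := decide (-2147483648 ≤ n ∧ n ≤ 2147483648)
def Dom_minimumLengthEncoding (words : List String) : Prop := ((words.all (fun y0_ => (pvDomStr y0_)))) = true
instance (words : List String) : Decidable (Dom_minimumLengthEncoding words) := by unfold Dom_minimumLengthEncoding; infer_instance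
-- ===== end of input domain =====

-- B counts each distinct word that is not a proper suffix of another distinct word, by direct
-- pairwise suffix tests on the set, instead of A's reverse-sort-and-scan; the return values are
-- proved equal outside D_ (nonempty all-empty-string inputs), where A and B intentionally differ.

-- ===== PORT A =====
-- word[::-1] ; exact by PySem.Str.slice?_none_none_neg_one (s[::-1] = reverse, never raises)
def pyRev (w : String) : String := String.ofList w.toList.reverse

-- loop body: state (last, res); 'if not word.startswith(last): res += len(last)+1' then 'last = word'
def stepA (st : String × Int) (word : String) : String × Int :=
  (word, if ¬ (PySem.Str.startswith word st.1) then st.2 + PySem.Str.len st.1 + 1 else st.2)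

def minimumLengthEncoding (words : List String) : Int :=
  let ws := PySem.List.sorted ((PySem.Set.ofList words).map pyRev) (fun w => w)
  ((ws ++ [""]).foldl stepA ("", 0)).2

-- ===== PORT B =====
def minimumLengthEncoding_alt (words : List String) : Int :=
  let ws := PySem.Set.ofList words
  let suffixes := PySem.Set.ofList (ws.flatMap (fun w =>
    (PySem.List.pyRange 1 (PySem.Str.len w + 1)).map (fun k => PySem.Str.slice w (some k) none)))
  ((ws.filter (fun w => ! PySem.Set.contains suffixes w)).map
    (fun w => PySem.Str.len w + 1)).sum

-- ===== PRECONDITION & SPEC =====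
-- On nonempty lists whose words are all the empty string, A returns 0 (its sentinel '' at the end
-- of the sorted scan silently absorbs the empty word) while B returns 1, the length of the
-- encoding '#' of the empty word, which is the intended value.
def D_minimumLengthEncoding (words : List String) : Prop := words ≠ [] ∧ ∀ w ∈ words, w = ""
instance (words : List String) : Decidable (D_minimumLengthEncoding words) := by
  unfold D_minimumLengthEncoding; infer_instance

def Spec_minimumLengthEncoding (words : List String) (out : Int) : Prop :=
  ¬ D_minimumLengthEncoding words → out = minimumLengthEncoding_alt words
instance (words : List String) (out : Int) : Decidable (Spec_minimumLengthEncoding words out) := by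
  unfold Spec_minimumLengthEncoding; infer_instance

def pvDiffWitness_minimumLengthEncoding : List String := [""]
def pvDiffWitnessOut_minimumLengthEncoding : Int × Int := (0, 1)

-- ===== CLAIM (what is proved, stated in full; the proofs are below) =====
def Claim_unchanged_minimumLengthEncoding : Prop := ∀ (words : List String), Dom_minimumLengthEncoding words → Spec_minimumLengthEncoding words (minimumLengthEncoding words)
def Claim_changed_minimumLengthEncoding : Prop := Dom_minimumLengthEncoding (pvDiffWitness_minimumLengthEncoding) ∧ D_minimumLengthEncoding (pvDiffWitness_minimumLengthEncoding) ∧ minimumLengthEncoding (pvDiffWitness_minimumLengthEncoding) = pvDiffWitnessOut_minimumLengthEncoding.1 ∧ minimumLengthEncoding_alt (pvDiffWitness_minimumLengthEncoding) = pvDiffWitnessOut_minimumLengthEncoding.2 ∧ pvDiffWitnessOut_minimumLengthEncoding.1 ≠ pvDiffWitnessOut_minimumLengthEncoding.2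
def Claim_exact_minimumLengthEncoding : Prop := ∀ (words : List String), Dom_minimumLengthEncoding words → D_minimumLengthEncoding words → minimumLengthEncoding words ≠ minimumLengthEncoding_alt words

-- ===== LEMMAS AND PROOFS =====

theorem startswith_eq_prefix (s p : String) :
    PySem.Str.startswith s p = decide (p.toList <+: s.toList) := by
  rw [PySem.Str.startswith_eq]
  simp only [PySem.Chars.startswith]
  rw [Bool.eq_iff_iff]; simp [List.isPrefixOf_iff_prefix]

-- membership in B's suffix set = being a proper suffix of some element
theorem mem_suffixes_iff (ws : List String) (u : String) :
    u ∈ PySem.Set.ofList (ws.flatMap (fun w =>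
      (PySem.List.pyRange 1 (PySem.Str.len w + 1)).map (fun k => PySem.Str.slice w (some k) none)))
    ↔ ∃ v ∈ ws, u.toList <:+ v.toList ∧ u ≠ v := by
  rw [PySem.Set.mem_ofList, List.mem_flatMap]
  constructor
  · rintro ⟨v, hv, hu⟩
    obtain ⟨k, hk, rfl⟩ := List.mem_map.mp hu
    obtain ⟨hk1, hk2⟩ := PySem.List.mem_pyRange_one.mp hk
    rw [PySem.Str.len_eq] at hk2
    have htl : (PySem.Str.slice v (some k) none).toList = v.toList.drop k.toNat := by
      rw [PySem.Str.toList_slice]; exact PySem.List.slice_from _ (by omega)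
    refine ⟨v, hv, ?_, ?_⟩
    · rw [htl]; exact List.drop_suffix _ _
    · intro he
      have hlen := congrArg (fun s => s.toList.length) he
      simp only [htl, List.length_drop] at hlen
      omega
  · rintro ⟨v, hv, ⟨t, ht⟩, hne⟩
    have htne : t ≠ [] := by
      rintro rfl
      exact hne (String.toList_inj.mp (by simpa using ht))
    have h1 : 1 ≤ t.length := Nat.one_le_iff_ne_zero.mpr (by simpa using htne)
    have hvlen : v.toList.length = t.length + u.toList.length := by
      rw [← ht]; simp
    refine ⟨v, hv, List.mem_map.mpr ⟨(t.length : Int), ?_, ?_⟩⟩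
    · rw [PySem.List.mem_pyRange_one, PySem.Str.len_eq]
      constructor
      · exact_mod_cast h1
      · omega
    · rw [← String.toList_inj, PySem.Str.toList_slice]
      rw [show PySem.Chars.slice v.toList (some (t.length : Int)) none =
            v.toList.drop ((t.length : Int)).toNat from PySem.List.slice_from _ (by omega)]
      rw [← ht]
      simp

theorem str_lt_iff (s t : String) : s < t ↔ List.Lex (·<·) s.toList t.toList := by
  rw [String.lt_iff_toList_lt]; exact List.lt_iff_lex_lt _ _

theorem str_eq_empty_iff (s : String) : s = "" ↔ s.toList = [] := by
  constructor
  · rintro rfl; rfl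
  · intro h; rw [← String.toList_inj, h]; rfl

theorem pyRev_inj : Function.Injective pyRev := by
  intro a b h
  have h' := congrArg String.toList h
  simp only [pyRev, String.toList_ofList] at h'
  exact String.toList_inj.mp (List.reverse_injective h')

theorem toList_pyRev (w : String) : (pyRev w).toList = w.toList.reverse := by
  simp [pyRev, String.toList_ofList]

-- a prefix is never lexicographically above what it prefixes
theorem not_lex_of_prefix : ∀ (w v : List Char), w <+: v → ¬ List.Lex (·<·) v w := by
  intro w
  induction w with
  | nil => intro v _ hlex; cases hlex
  | cons c w' ih =>
    rintro v hp hlex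
    obtain ⟨t, rfl⟩ := hp
    cases hlex with
    | rel h => exact lt_irrefl _ h
    | cons h => exact ih _ ⟨t, rfl⟩ h

-- between two lexicographic bounds, a prefix of the upper bound is a prefix of the middle
theorem prefix_between : ∀ (w u v : List Char),
    (List.Lex (·<·) w u ∨ w = u) → (List.Lex (·<·) u v ∨ u = v) → w <+: v → w <+: u := by
  intro w
  induction w with
  | nil => intro u v _ _ _; exact List.nil_prefix
  | cons c w' ih =>
    intro u v h1 h2 h3
    rcases h1 with h1 | rfl
    case inr => exact List.prefix_rfl
    cases u with
    | nil => cases h1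
    | cons d u' =>
      cases v with
      | nil => exact absurd h3 (by simp)
      | cons e v' =>
        rw [List.cons_prefix_cons] at h3
        obtain ⟨rfl, h3'⟩ := h3
        cases h1 with
        | rel hcd =>
          exfalso
          rcases h2 with h2 | h2
          · cases h2 with
            | rel hde => exact lt_irrefl _ (hcd.trans hde)
            | cons _ => exact lt_irrefl _ hcd
          · cases h2; exact lt_irrefl _ hcd
        | cons hlex' =>
          rw [List.cons_prefix_cons]
          refine ⟨rfl, ih u' v' (Or.inl hlex') ?_ h3'⟩
          rcases h2 with h2 | h2
          · cases h2 with
            | rel h => exact absurd h (lt_irrefl _)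
            | cons h => exact Or.inl h
          · cases h2; exact Or.inr rfl

-- the Boolean "w is kept" condition of the characterisation of A's scan
def keepB (l : List String) (w : String) : Bool :=
  (w != "") && l.all (fun v => v == w || ! decide (w.toList <+: v.toList))

-- A's scan over a strictly sorted list, characterised element-wise
theorem scan_eq : ∀ (l : List String) (last : String) (res : Int),
    List.Pairwise (· < ·) l → (last = "" ∨ ∀ v ∈ l, last < v) →
    ((l ++ [""]).foldl stepA (last, res)).2 =
      res + (if (last != "") && l.all (fun v => ! decide (last.toList <+: v.toList))
             then PySem.Str.len last + 1 else 0)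
          + (l.map (fun w => if keepB l w then PySem.Str.len w + 1 else 0)).sum := by
  intro l
  induction l with
  | nil =>
    intro last res _ _
    simp only [List.nil_append, List.foldl_cons, List.foldl_nil, stepA, List.map_nil,
      List.sum_nil, List.all_nil, Bool.and_true, add_zero]
    rw [startswith_eq_prefix]
    by_cases h : last = ""
    · subst h; simp
    · simp [h]
      ring
  | cons w1 rest ih =>
    intro last res hpw hord
    obtain ⟨hhead, htail⟩ := List.pairwise_cons.mp hpw
    simp only [List.cons_append, List.foldl_cons]
    have hstep : stepA (last, res) w1 =
        (w1, if ¬ (PySem.Str.startswith w1 last) then res + PySem.Str.len last + 1 else res) := rfl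
    rw [hstep, ih w1 _ htail (Or.inr hhead)]
    have P1 : (if ¬ (PySem.Str.startswith w1 last) then res + PySem.Str.len last + 1 else res) =
        res + (if (last != "") && (w1 :: rest).all (fun v => ! decide (last.toList <+: v.toList))
               then PySem.Str.len last + 1 else 0) := by
      rw [startswith_eq_prefix]
      by_cases h : last = ""
      · subst h
        simp
      · have hlt : ∀ v ∈ w1 :: rest, last < v := hord.resolve_left h
        by_cases hpfx : last.toList <+: w1.toList
        · have hall : ((w1 :: rest).all (fun v => ! decide (last.toList <+: v.toList))) = false := by
            rw [List.all_eq_false]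
            exact ⟨w1, by simp, by simp [hpfx]⟩
          rw [hall]
          simp [hpfx]
        · have hall : ((w1 :: rest).all (fun v => ! decide (last.toList <+: v.toList))) = true := by
            simp only [List.all_eq_true]
            intro v hv
            simp only [Bool.not_eq_eq_eq_not, Bool.not_true, decide_eq_false_iff_not]
            intro hpv
            apply hpfx
            refine prefix_between last.toList w1.toList v.toList
              (Or.inl ((str_lt_iff _ _).mp (hlt w1 (by simp)))) ?_ hpv
            rcases List.mem_cons.mp hv with rfl | hv
            · exact Or.inr rfl
            · exact Or.inl ((str_lt_iff _ _).mp (hhead v hv))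
          simp [hpfx, hall, h]
          ring
    have P2 : ((w1 != "") && rest.all (fun v => ! decide (w1.toList <+: v.toList))) = keepB (w1 :: rest) w1 := by
      unfold keepB
      rw [Bool.eq_iff_iff]
      simp only [Bool.and_eq_true, List.all_eq_true, bne_iff_ne]
      constructor
      · rintro ⟨hne, hall⟩
        refine ⟨hne, ?_⟩
        intro v hv
        rcases List.mem_cons.mp hv with rfl | hv
        · simp
        · simpa using Or.inr (hall v hv)
      · rintro ⟨hne, hall⟩
        refine ⟨hne, ?_⟩
        intro v hv
        have := hall v (by simp [hv])
        have hvne : v ≠ w1 := ne_of_gt (hhead v hv)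
        simpa [hvne] using this
    have P3 : (rest.map (fun w => if keepB rest w then PySem.Str.len w + 1 else 0)) =
        (rest.map (fun w => if keepB (w1 :: rest) w then PySem.Str.len w + 1 else 0)) := by
      apply List.map_congr_left
      intro w hw
      have hke : keepB rest w = keepB (w1 :: rest) w := by
        unfold keepB
        have hnp : ¬ (w.toList <+: w1.toList) := by
          intro hp
          exact not_lex_of_prefix _ _ hp ((str_lt_iff _ _).mp (hhead w hw))
        simp [hnp]
      rw [hke]
    rw [P1, P2, P3]
    simp only [List.map_cons, List.sum_cons]
    ring

theorem sum_map_filter {α : Type} (p : α → Bool) (f : α → Int) (xs : List α) :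
    ((xs.filter p).map f).sum = (xs.map (fun x => if p x then f x else 0)).sum := by
  induction xs with
  | nil => rfl
  | cons x xs ih => by_cases h : p x <;> simp [h, ih]

theorem aux_fold_empty : ∀ (rest : List String), (∀ w ∈ rest, w = "") →
    rest.foldl PySem.Set.add [""] = [""] := by
  intro rest
  induction rest with
  | nil => intro _; rfl
  | cons w rest ih =>
    intro h
    have hw := h w (by simp)
    subst hw
    have hadd : PySem.Set.add [""] "" = [""] := by decide
    simpa [hadd] using ih (fun v hv => h v (by simp [hv]))

theorem ofList_all_empty (ws : List String) (hne : ws ≠ []) (hall : ∀ w ∈ ws, w = "") :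
    PySem.Set.ofList ws = [""] := by
  cases ws with
  | nil => exact absurd rfl hne
  | cons w rest =>
    have hw := hall w (by simp)
    subst hw
    rw [PySem.Set.ofList_eq_foldl]
    have h0 : PySem.Set.add [] "" = [""] := by decide
    simpa [List.foldl_cons, h0] using aux_fold_empty rest (fun v hv => hall v (by simp [hv]))

-- ===== VERDICT (by name: the statement is the Claim_ definition above) =====
theorem minimumLengthEncoding_spec : Claim_unchanged_minimumLengthEncoding := by
  intro words _ hnd
  unfold D_minimumLengthEncoding at hnd
  push Not at hnd
  show minimumLengthEncoding words = minimumLengthEncoding_alt words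
  have hSnodup := PySem.Set.nodup_ofList words
  set S := PySem.Set.ofList words with hSdef
  set R := S.map pyRev with hRdef
  set l := PySem.List.sorted R (fun w => w) with hldef
  have hRnodup : R.Nodup := List.Nodup.map pyRev_inj hSnodup
  have hperm : l.Perm R := PySem.List.sorted_perm R (fun w => w) false
  have hlt : List.Pairwise (· < ·) l :=
    ((PySem.List.sorted_pairwise R (fun w => w)).and (hperm.nodup_iff.mpr hRnodup)).imp
      (fun h => lt_of_le_of_ne h.1 h.2)
  have hA : minimumLengthEncoding words =
      (l.map (fun w => if keepB l w then PySem.Str.len w + 1 else 0)).sum := by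
    show ((l ++ [""]).foldl stepA ("", 0)).2 = _
    rw [scan_eq l "" 0 hlt (Or.inl rfl)]
    norm_num
  have hkeep : ∀ w, keepB l w = keepB R w := by
    intro w
    unfold keepB
    rw [Bool.eq_iff_iff]
    simp only [Bool.and_eq_true, List.all_eq_true]
    constructor
    · rintro ⟨h1, h2⟩; exact ⟨h1, fun v hv => h2 v (hperm.mem_iff.mpr hv)⟩
    · rintro ⟨h1, h2⟩; exact ⟨h1, fun v hv => h2 v (hperm.mem_iff.mp hv)⟩
  have hsum : (l.map (fun w => if keepB l w then PySem.Str.len w + 1 else 0)).sum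
      = (R.map (fun w => if keepB R w then PySem.Str.len w + 1 else 0)).sum := by
    rw [List.map_congr_left (fun w _ => by rw [hkeep w])]
    exact (hperm.map _).sum_eq
  have hB : minimumLengthEncoding_alt words =
      (S.map (fun u => if ! PySem.Set.contains (PySem.Set.ofList (S.flatMap (fun w =>
              (PySem.List.pyRange 1 (PySem.Str.len w + 1)).map
                (fun k => PySem.Str.slice w (some k) none)))) u
                       then PySem.Str.len u + 1 else 0)).sum := by
    show ((S.filter _).map _).sum = _
    rw [sum_map_filter]
  have hsfx : ∀ x : String, PySem.Set.contains (PySem.Set.ofList (S.flatMap (fun w =>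
      (PySem.List.pyRange 1 (PySem.Str.len w + 1)).map
        (fun k => PySem.Str.slice w (some k) none)))) x = true ↔
      ∃ v ∈ S, x.toList <:+ v.toList ∧ x ≠ v := by
    intro x
    rw [show ∀ (s : PySem.Set String), (PySem.Set.contains s x = true ↔ x ∈ s) from
      fun s => by simp [PySem.Set.contains]]
    exact mem_suffixes_iff S x
  rw [hA, hsum, hB, hRdef, List.map_map]
  congr 1
  apply List.map_congr_left
  intro u hu
  simp only [Function.comp]
  have hlen : PySem.Str.len (pyRev u) = PySem.Str.len u := by
    simp [PySem.Str.len_eq, toList_pyRev]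
  by_cases hue : u = ""
  · subst hue
    have huw : ("" : String) ∈ words := (PySem.Set.mem_ofList words "").mp hu
    obtain ⟨w0, hw0, hw0ne⟩ := hnd (by rintro rfl; cases huw)
    have hin : PySem.Set.contains (PySem.Set.ofList (S.flatMap (fun w =>
        (PySem.List.pyRange 1 (PySem.Str.len w + 1)).map
          (fun k => PySem.Str.slice w (some k) none)))) "" = true := by
      rw [hsfx]
      exact ⟨w0, (PySem.Set.mem_ofList words w0).mpr hw0, by simp, fun h => hw0ne h.symm⟩
    rw [hin]
    have hk : keepB (S.map pyRev) (pyRev "") = false := by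
      unfold keepB
      simp [pyRev]
    rw [hk]
    simp
  · have hkeq : keepB (S.map pyRev) (pyRev u) =
        ! PySem.Set.contains (PySem.Set.ofList (S.flatMap (fun w =>
          (PySem.List.pyRange 1 (PySem.Str.len w + 1)).map
            (fun k => PySem.Str.slice w (some k) none)))) u := by
      rw [Bool.eq_iff_iff, Bool.not_eq_true', Bool.eq_false_iff, ne_eq, hsfx]
      unfold keepB
      simp only [Bool.and_eq_true, List.all_eq_true]
      constructor
      · rintro ⟨_, hall⟩
        rintro ⟨v, hv, hsuf, hneq⟩
        have hthis := hall (pyRev v) (List.mem_map.mpr ⟨v, hv, rfl⟩)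
        have hbne : (pyRev v == pyRev u) = false := by
          simp only [beq_eq_false_iff_ne, ne_eq]
          intro hc
          exact hneq (pyRev_inj hc).symm
        rw [hbne] at hthis
        simp only [Bool.false_or, Bool.not_eq_eq_eq_not, Bool.not_true,
          decide_eq_false_iff_not] at hthis
        exact hthis (by rw [toList_pyRev, toList_pyRev]; exact List.reverse_prefix.mpr hsuf)
      · intro hnex
        refine ⟨?_, ?_⟩
        · simp only [bne_iff_ne, ne_eq]
          intro hc
          apply hue
          rw [str_eq_empty_iff] at hc ⊢
          rw [toList_pyRev] at hc
          simpa using hc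
        · intro v hvR
          obtain ⟨v0, hv0, rfl⟩ := List.mem_map.mp hvR
          by_cases hv0u : v0 = u
          · subst hv0u; simp
          · have hns : ¬ (u.toList <:+ v0.toList) := fun hsuf =>
              hnex ⟨v0, hv0, hsuf, fun h => hv0u h.symm⟩
            have hnp : ¬ ((pyRev u).toList <+: (pyRev v0).toList) := by
              rw [toList_pyRev, toList_pyRev]
              intro hp
              exact hns (List.reverse_prefix.mp hp)
            simp [hnp]
    rw [hkeq, hlen]

theorem minimumLengthEncoding_changed : Claim_changed_minimumLengthEncoding := by
  unfold Claim_changed_minimumLengthEncoding; decide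

theorem minimumLengthEncoding_tight : Claim_exact_minimumLengthEncoding := by
  intro words _ hd
  obtain ⟨hne, hall⟩ := hd
  have hS : PySem.Set.ofList words = [""] := ofList_all_empty words hne hall
  have hA : minimumLengthEncoding words = 0 := by
    show ((PySem.List.sorted ((PySem.Set.ofList words).map pyRev) (fun w => w) ++ [""]).foldl
      stepA ("", 0)).2 = 0
    rw [hS]
    decide
  have hB : minimumLengthEncoding_alt words = 1 := by
    show (((PySem.Set.ofList words).filter _).map _).sum = 1
    rw [hS]
    decide
  rw [hA, hB]
  decide
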